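-- pv_equiv track=rewrite | github.com/17chuhai-dev/zinses-rechner-optimization | backend/app/core/security.py | sanitize_string
-- ===== SOURCE A (Python) =====
-- def sanitize_string(value: str, max_length: int = 1000) -> str:
--     """清理字符串输入"""
--     if not isinstance(value, str):
--         raise ValueError("Input must be a string")
--
--     # 移除危险字符
--     dangerous_chars = ['<', '>', '"', "'", '&', '\x00', '\n', '\r', '\t']
--     for char in dangerous_chars:
--         value = value.replace(char, '')
--
--     # 限制长度
--     if len(value) > max_length:
--         value = value[:max_length]
--
--     return value.strip()
-- ===== SOURCE B (Python) =====
-- def sanitize_string(value: str, max_length: int = 1000) -> str: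
--     """Clean a string input: single filtering pass over the characters."""
--     if not isinstance(value, str):
--         raise ValueError("Input must be a string")
--
--     dangerous = {'<', '>', '"', "'", '&', '\x00', '\n', '\r', '\t'}
--     kept = []
--     for ch in value:
--         if ch not in dangerous:
--             kept.append(ch)
--     cleaned = ''.join(kept)
--
--     if len(cleaned) > max_length:
--         cleaned = cleaned[:max_length]
--
--     return cleaned.strip()
-- ===== Notes on version B (the rewrite author's own statement) =====
-- stated objective: simpler
-- what changed: Replaces nine sequential full-string str.replace scans by one filtering pass that keeps each character unless it is in a set of the nine dangerous characters.
import Mathlib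
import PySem

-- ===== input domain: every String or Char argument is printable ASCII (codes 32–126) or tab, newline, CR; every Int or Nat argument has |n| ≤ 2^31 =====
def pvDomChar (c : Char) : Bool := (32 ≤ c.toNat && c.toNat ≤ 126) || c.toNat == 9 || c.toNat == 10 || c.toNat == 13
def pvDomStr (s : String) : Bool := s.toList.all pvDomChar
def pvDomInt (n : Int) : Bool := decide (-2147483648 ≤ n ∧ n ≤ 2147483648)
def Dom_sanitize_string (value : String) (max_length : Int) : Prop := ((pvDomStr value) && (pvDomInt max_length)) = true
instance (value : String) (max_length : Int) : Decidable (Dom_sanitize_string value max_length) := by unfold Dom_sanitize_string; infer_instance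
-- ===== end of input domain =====

-- B replaces A's nine sequential str.replace scans by one filtering pass with a set of dangerous chars; same truncate-then-strip tail.

-- ===== PORT A =====
-- nine sequential value.replace(char, '') scans, then truncate, then strip
def sanitize_string (value : String) (max_length : Int) : String :=
  let dangerous_chars : List String := ["<", ">", "\"", "'", "&", "\x00", "\n", "\r", "\t"]
  let value := dangerous_chars.foldl (fun v ch => PySem.Str.replace v ch "") value
  let value := if (PySem.Str.len value : Int) > max_length
               then PySem.Str.slice value none (some max_length) else value
  PySem.Str.strip value

-- ===== PORT B =====
-- one pass over the characters, keeping those not in the dangerous set; then truncate, then strip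
def sanitize_string_alt (value : String) (max_length : Int) : String :=
  let dangerous : List Char := ['<', '>', '"', '\'', '&', '\x00', '\n', '\r', '\t']
  let kept := value.toList.foldl (fun acc c => if dangerous.contains c then acc else acc ++ [c]) []
  let cleaned := if ((kept.length : Int) > max_length)
                 then PySem.Chars.slice kept none (some max_length) else kept
  String.ofList (PySem.Chars.strip cleaned)

-- ===== PRECONDITION & SPEC =====
def Spec_sanitize_string (value : String) (max_length : Int) (out : String) : Prop := out = sanitize_string_alt value max_length
instance (value : String) (max_length : Int) (out : String) : Decidable (Spec_sanitize_string value max_length out) := by unfold Spec_sanitize_string; infer_instance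

-- ===== CLAIM (what is proved, stated in full; the proofs are below) =====
def Claim_equal_sanitize_string : Prop := ∀ (value : String) (max_length : Int), Dom_sanitize_string value max_length → Spec_sanitize_string value max_length (sanitize_string value max_length)

-- ===== LEMMAS AND PROOFS =====

-- replace(c, '') is filtering out c
theorem replace_go_single (c : Char) : ∀ (fuel : Nat) (l acc : List Char), l.length ≤ fuel →
    PySem.Chars.replace.go [c] [] fuel l acc = acc.reverse ++ l.filter (fun a => a ≠ c) := by
  intro fuel
  induction fuel with
  | zero => intro l acc h; cases l with
    | nil => simp [PySem.Chars.replace.go]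
    | cons x t => simp at h
  | succ n ih =>
    intro l acc h
    cases l with
    | nil => simp [PySem.Chars.replace.go]
    | cons x t =>
      simp only [PySem.Chars.replace.go]
      by_cases hx : x = c
      · subst hx
        have : List.isPrefixOf [x] (x :: t) = true := by simp [List.isPrefixOf]
        rw [if_pos this]
        rw [ih _ _ (by simpa using Nat.le_of_succ_le_succ h)]
        simp
      · have : List.isPrefixOf [c] (x :: t) = false := by
          simp [List.isPrefixOf]; exact fun hc => (hx hc.symm).elim
        rw [if_neg (by simp [this])]
        rw [ih _ _ (by simpa using Nat.le_of_succ_le_succ h)]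
        simp [hx]

theorem replace_single (cs : List Char) (c : Char) :
    PySem.Chars.replace cs [c] [] = cs.filter (fun a => a ≠ c) := by
  rw [PySem.Chars.replace]
  simp only [List.isEmpty_cons, if_false, Bool.false_eq_true]
  exact replace_go_single c cs.length cs [] le_rfl

theorem foldl_keep (d : List Char) (cs acc : List Char) :
    cs.foldl (fun acc c => if d.contains c then acc else acc ++ [c]) acc
      = acc ++ cs.filter (fun c => ¬ d.contains c) := by
  induction cs generalizing acc with
  | nil => simp
  | cons x t ih =>
    simp only [List.foldl_cons, List.filter_cons]
    rw [ih]
    by_cases hx : x ∈ d <;> simp [hx]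

theorem replace_step (cs : List Char) (old : String) (c : Char) (h : old.toList = [c]) :
    PySem.Str.replace (String.ofList cs) old "" = String.ofList (cs.filter (fun a => a ≠ c)) := by
  simp [PySem.Str.replace, h, replace_single]

theorem sanitize_string_spec_aux (value : String) (max_length : Int) :
    sanitize_string value max_length = sanitize_string_alt value max_length := by
  unfold sanitize_string sanitize_string_alt
  simp only [List.foldl_cons, List.foldl_nil]
  rw [foldl_keep, List.nil_append]
  rw [show value = String.ofList value.toList by simp]
  rw [replace_step _ "<" '<' (by decide), replace_step _ ">" '>' (by decide),
      replace_step _ "\"" '"' (by decide), replace_step _ "'" '\'' (by decide),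
      replace_step _ "&" '&' (by decide), replace_step _ "\x00" '\x00' (by decide),
      replace_step _ "\n" '\n' (by decide), replace_step _ "\x0d" '\r' (by decide),
      replace_step _ "\t" '\t' (by decide)]
  have hfilt : ((((((((value.toList.filter (fun a => a ≠ '<')).filter (fun a => a ≠ '>')).filter
      (fun a => a ≠ '"')).filter (fun a => a ≠ '\'')).filter (fun a => a ≠ '&')).filter
      (fun a => a ≠ '\x00')).filter (fun a => a ≠ '\n')).filter (fun a => a ≠ '\r')).filter
      (fun a => a ≠ '\t')
      = value.toList.filter (fun c => ¬ (['<', '>', '"', '\'', '&', '\x00', '\n', '\r', '\t'].contains c)) := by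
    simp only [List.filter_filter]
    refine List.filter_congr ?_
    intro a _
    by_cases h : a ∈ (['<', '>', '"', '\'', '&', '\x00', '\n', '\r', '\t'] : List Char)
    · fin_cases h <;> decide
    · simp_all [List.contains_eq_mem, List.mem_cons, not_or]
  rw [hfilt]
  simp only [PySem.Str.strip, PySem.Str.slice, PySem.Str.len, String.toList_ofList]
  split_ifs <;> simp

-- ===== VERDICT (by name: the statement is the Claim_ definition above) =====
theorem sanitize_string_spec : Claim_equal_sanitize_string := by
  intro value max_length _
  exact sanitize_string_spec_aux value max_length
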